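-- pv_equiv track=rewrite | github.com/Therasdin/Hangman | Hangman.py | get_best_letter_from_likely_word
-- ===== SOURCE A (Python) =====
-- def get_best_letter_from_likely_word(word_completion, guessed_letters, words, frequencies):
--     possible = []
--
--     for word, weight in zip(words, frequencies):
--         if len(word) != len(word_completion):
--             continue
--         match = True
--         for wc, actual in zip(word_completion, word):
--             if wc != '_' and wc != actual:
--                 match = False
--                 break
--             if wc == '_' and actual in guessed_letters:
--                 match = False
--                 break
--         if match:
--             possible.append((word, weight))
--
--     if not possible:
--         return None  # fallback to letter ranking?
--
--     # Sort by highest frequency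
--     possible.sort(key=lambda x: x[1], reverse=True)
--     best_word = possible[0][0]
--
--     for letter in best_word:
--         if letter not in guessed_letters:
--             return letter
--
--     return None  # All letters already guessed
-- ===== SOURCE B (Python) =====
-- def get_best_letter_from_likely_word(word_completion, guessed_letters, words, frequencies):
--     def matches(word):
--         return len(word) == len(word_completion) and all(
--             (actual not in guessed_letters) if wc == '_' else (wc == actual)
--             for wc, actual in zip(word_completion, word)
--         )
--
--     best_word = None
--     best_weight = None
--     for word, weight in zip(words, frequencies):
--         if matches(word) and (best_weight is None or weight > best_weight):
--             best_word, best_weight = word, weight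
--
--     if best_word is None:
--         return None
--     return next((c for c in best_word if c not in guessed_letters), None)
-- ===== Notes on version B (the rewrite author's own statement) =====
-- stated objective: simpler
-- what changed: Replaced the collected `possible` list plus stable reverse-sort with a single running best (strict > keeps the first maximal word) and the explicit letter loop with next() over a generator.
import Mathlib
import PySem

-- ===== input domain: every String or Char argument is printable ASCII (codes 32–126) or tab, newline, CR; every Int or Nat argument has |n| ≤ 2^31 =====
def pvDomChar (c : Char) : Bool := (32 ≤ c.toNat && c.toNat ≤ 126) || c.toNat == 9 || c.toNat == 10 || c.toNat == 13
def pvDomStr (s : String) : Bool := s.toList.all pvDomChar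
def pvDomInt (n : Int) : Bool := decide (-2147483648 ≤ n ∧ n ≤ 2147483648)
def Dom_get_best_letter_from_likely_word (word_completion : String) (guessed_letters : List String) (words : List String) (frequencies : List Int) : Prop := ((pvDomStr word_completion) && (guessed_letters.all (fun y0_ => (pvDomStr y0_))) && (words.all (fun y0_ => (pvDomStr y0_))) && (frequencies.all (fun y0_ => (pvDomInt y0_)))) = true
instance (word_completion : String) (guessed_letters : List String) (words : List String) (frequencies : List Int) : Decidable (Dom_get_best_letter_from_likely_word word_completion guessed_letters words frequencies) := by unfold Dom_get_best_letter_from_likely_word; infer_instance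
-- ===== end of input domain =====

-- ===== PORT A =====
-- B replaces the collected list + stable reverse-sort with a single running best (strict >); objective: simpler.
-- inner matching loop of A (with its two breaks), over zip(word_completion, word)
def pvMatchLoopA (guessed_letters : List String) : List (Char × Char) → Bool
  | [] => true
  | (wc, actual) :: rest =>
    if wc != '_' && wc != actual then false
    else if wc == '_' && guessed_letters.contains (String.mk [actual]) then false
    else pvMatchLoopA guessed_letters rest

-- final loop of A: first letter of best_word not in guessed_letters
def pvFirstUnguessedA (guessed_letters : List String) : List Char → Option String
  | [] => none
  | c :: rest =>
    if !(guessed_letters.contains (String.mk [c])) then some (String.mk [c])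
    else pvFirstUnguessedA guessed_letters rest

def get_best_letter_from_likely_word (word_completion : String) (guessed_letters : List String) (words : List String) (frequencies : List Int) : Option String :=
  let possible : List (String × Int) :=
    (words.zip frequencies).foldl (fun acc wp =>
      if PySem.Str.len wp.1 != PySem.Str.len word_completion then acc
      else if pvMatchLoopA guessed_letters (word_completion.toList.zip wp.1.toList) then acc ++ [wp]
      else acc) []
  match possible with
  | [] => none
  | _ :: _ =>
    match PySem.List.sorted possible (fun x => x.2) true with
    | [] => none   -- unreachable: sorted of a nonempty list is nonempty
    | best :: _ => pvFirstUnguessedA guessed_letters best.1.toList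

-- ===== PORT B =====
-- B's matches(word): length check && all over zip with a single conditional predicate
def pvMatchesB (word_completion : String) (guessed_letters : List String) (word : String) : Bool :=
  PySem.Str.len word == PySem.Str.len word_completion &&
  (word_completion.toList.zip word.toList).all (fun p =>
    if p.1 == '_' then !(guessed_letters.contains (String.mk [p.2])) else p.1 == p.2)

def get_best_letter_from_likely_word_alt (word_completion : String) (guessed_letters : List String) (words : List String) (frequencies : List Int) : Option String :=
  let best : Option (String × Int) :=
    (words.zip frequencies).foldl (fun b wp =>
      if pvMatchesB word_completion guessed_letters wp.1 then
        match b with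
        | none => some wp
        | some q => if wp.2 > q.2 then some wp else b
      else b) none
  match best with
  | none => none
  | some q =>
    (q.1.toList.find? (fun c => !(guessed_letters.contains (String.mk [c])))).map
      (fun c => String.mk [c])

-- ===== PRECONDITION & SPEC =====
def Spec_get_best_letter_from_likely_word (word_completion : String) (guessed_letters : List String) (words : List String) (frequencies : List Int) (out : Option String) : Prop := out = get_best_letter_from_likely_word_alt word_completion guessed_letters words frequencies
instance (word_completion : String) (guessed_letters : List String) (words : List String) (frequencies : List Int) (out : Option String) : Decidable (Spec_get_best_letter_from_likely_word word_completion guessed_letters words frequencies out) := by unfold Spec_get_best_letter_from_likely_word; infer_instance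

-- ===== CLAIM (what is proved, stated in full; the proofs are below) =====
def Claim_equal_get_best_letter_from_likely_word : Prop := ∀ (word_completion : String) (guessed_letters : List String) (words : List String) (frequencies : List Int), Dom_get_best_letter_from_likely_word word_completion guessed_letters words frequencies → Spec_get_best_letter_from_likely_word word_completion guessed_letters words frequencies (get_best_letter_from_likely_word word_completion guessed_letters words frequencies)

-- ===== LEMMAS AND PROOFS =====

-- the running-best update of B, as a named function for the lemmas
def pvUpd (b : Option (String × Int)) (wp : String × Int) : Option (String × Int) :=
  match b with
  | none => some wp
  | some q => if wp.2 > q.2 then some wp else b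

-- A's inner loop with breaks computes B's `all` over the same zip
lemma matchLoopA_eq_all (g : List String) (zs : List (Char × Char)) :
    pvMatchLoopA g zs =
      zs.all (fun p => if p.1 == '_' then !(g.contains (String.mk [p.2])) else p.1 == p.2) := by
  induction zs with
  | nil => rfl
  | cons p rest ih =>
    obtain ⟨wc, actual⟩ := p
    simp only [pvMatchLoopA, List.all_cons, ih]
    by_cases h : wc = '_'
    · subst h; simp
    · by_cases h2 : wc = actual
      · simp [h2]
      · simp [h, h2]

-- A's nested guard (length skip, then the matching loop, then append) equals a single filtered append with B's predicate
lemma condA_eq_matchesB (word_completion : String) (g : List String) (acc : List (String × Int)) (wp : String × Int) :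
    (if PySem.Str.len wp.1 != PySem.Str.len word_completion then acc
     else if pvMatchLoopA g (word_completion.toList.zip wp.1.toList) then acc ++ [wp]
     else acc) =
    (if pvMatchesB word_completion g wp.1 then acc ++ [wp] else acc) := by
  simp only [pvMatchesB, matchLoopA_eq_all]
  by_cases h : wp.1.length = word_completion.length
  · simp [PySem.Str.len_eq, h]
  · simp [PySem.Str.len_eq, h]

-- head of insertBy (the reverse comparator) = one step of the running best
lemma head_insertBy (x : String × Int) (ys : List (String × Int)) :
    (PySem.List.insertBy (fun a b => decide ((fun p : String × Int => p.2) b < (fun p : String × Int => p.2) a)) x ys).head? =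
      pvUpd ys.head? x := by
  cases ys with
  | nil => rfl
  | cons y t =>
    simp only [PySem.List.insertBy, pvUpd]
    by_cases h : y.2 < x.2
    · simp [h]
    · simp [h]

-- head of the insertion-sort fold = the running-best fold
lemma head_foldl_insertBy (l : List (String × Int)) (acc : List (String × Int)) :
    (l.foldl (fun a x => PySem.List.insertBy (fun a b => decide ((fun p : String × Int => p.2) b < (fun p : String × Int => p.2) a)) x a) acc).head? =
      l.foldl pvUpd acc.head? := by
  induction l generalizing acc with
  | nil => rfl
  | cons x rest ih =>
    simp only [List.foldl_cons, ih, head_insertBy]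

-- first element of the stable reverse sort by weight = B's running best (strict >)
lemma head_sorted_rev (l : List (String × Int)) :
    (PySem.List.sorted l (fun x => x.2) true).head? = l.foldl pvUpd none := by
  rw [PySem.List.sorted_rev_eq_foldl_insertBy]
  exact head_foldl_insertBy l []

-- A's final letter loop is find?+map
lemma firstUnguessedA_eq_find (g : List String) (cs : List Char) :
    pvFirstUnguessedA g cs =
      (cs.find? (fun c => !(g.contains (String.mk [c])))).map (fun c => String.mk [c]) := by
  induction cs with
  | nil => rfl
  | cons c rest ih =>
    simp only [pvFirstUnguessedA, List.find?]
    by_cases h : String.mk [c] ∈ g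
    · simp [h, ih]
    · simp [h]

-- ===== VERDICT (by name: the statement is the Claim_ definition above) =====
theorem get_best_letter_from_likely_word_spec : Claim_equal_get_best_letter_from_likely_word := by
  intro word_completion guessed_letters words frequencies _
  unfold Spec_get_best_letter_from_likely_word
  unfold get_best_letter_from_likely_word get_best_letter_from_likely_word_alt
  have hA : ((words.zip frequencies).foldl (fun acc wp =>
      if PySem.Str.len wp.1 != PySem.Str.len word_completion then acc
      else if pvMatchLoopA guessed_letters (word_completion.toList.zip wp.1.toList) then acc ++ [wp]
      else acc) [] : List (String × Int)) =
      (words.zip frequencies).filter (fun wp => pvMatchesB word_completion guessed_letters wp.1) := by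
    rw [show (fun (acc : List (String × Int)) (wp : String × Int) =>
        if PySem.Str.len wp.1 != PySem.Str.len word_completion then acc
        else if pvMatchLoopA guessed_letters (word_completion.toList.zip wp.1.toList) then acc ++ [wp]
        else acc) =
        (fun acc wp => if pvMatchesB word_completion guessed_letters wp.1 then acc ++ [wp] else acc) from
      funext fun acc => funext fun wp => condA_eq_matchesB word_completion guessed_letters acc wp]
    exact PySem.List.foldl_append_if_eq_filter _ _ []
  have hB : ((words.zip frequencies).foldl (fun b wp =>
      if pvMatchesB word_completion guessed_letters wp.1 then
        match b with
        | none => some wp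
        | some q => if wp.2 > q.2 then some wp else b
      else b) none) =
      ((words.zip frequencies).filter (fun wp => pvMatchesB word_completion guessed_letters wp.1)).foldl pvUpd none :=
    PySem.List.foldl_if_eq_foldl_filter _ pvUpd _ none
  simp only [hA, hB]
  cases hq : (words.zip frequencies).filter (fun wp => pvMatchesB word_completion guessed_letters wp.1) with
  | nil => simp
  | cons x t =>
    rw [← hq, ← head_sorted_rev]
    cases hs : PySem.List.sorted ((words.zip frequencies).filter (fun wp => pvMatchesB word_completion guessed_letters wp.1)) (fun x => x.2) true with
    | nil =>
      rw [PySem.List.sorted_eq_nil_iff] at hs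
      rw [hq] at hs; cases hs
    | cons best rest =>
      rw [hq]
      simp only [List.head?_cons, firstUnguessedA_eq_find]
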